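-- pv_equiv track=rewrite | github.com/rjflores2/DERopt_Python | data_loading/loaders/utility_rates/sce.py | _fill_schedule
-- ===== SOURCE A (Python) =====
-- def _fill_schedule(sched: list, default: int = 0) -> list[list[int]]:
--     """Return 12×24 grid: schedule[month][hour] = tier index. Fills missing with default."""
--     out = []
--     for m in range(12):
--         row = []
--         for h in range(24):
--             v = default
--             if m < len(sched) and h < len(sched[m]):
--                 v = sched[m][h]
--             row.append(v)
--         out.append(row)
--     return out
-- ===== SOURCE B (Python) =====
-- def _fill_schedule(sched: list, default: int = 0) -> list[list[int]]:
--     """Return 12x24 grid built row by row: pad short rows, truncate long ones."""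
--     pad = [default] * 24
--     out = []
--     for m in range(12):
--         if m < len(sched):
--             out.append((list(sched[m][:24]) + pad)[:24])
--         else:
--             out.append(list(pad))
--     return out
-- ===== Notes on version B (the rewrite author's own statement) =====
-- stated objective: simpler
-- what changed: Builds the grid row by row with slice-and-pad (truncate to 24, pad with defaults) instead of a per-cell bounds-checked double loop.
import Mathlib
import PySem

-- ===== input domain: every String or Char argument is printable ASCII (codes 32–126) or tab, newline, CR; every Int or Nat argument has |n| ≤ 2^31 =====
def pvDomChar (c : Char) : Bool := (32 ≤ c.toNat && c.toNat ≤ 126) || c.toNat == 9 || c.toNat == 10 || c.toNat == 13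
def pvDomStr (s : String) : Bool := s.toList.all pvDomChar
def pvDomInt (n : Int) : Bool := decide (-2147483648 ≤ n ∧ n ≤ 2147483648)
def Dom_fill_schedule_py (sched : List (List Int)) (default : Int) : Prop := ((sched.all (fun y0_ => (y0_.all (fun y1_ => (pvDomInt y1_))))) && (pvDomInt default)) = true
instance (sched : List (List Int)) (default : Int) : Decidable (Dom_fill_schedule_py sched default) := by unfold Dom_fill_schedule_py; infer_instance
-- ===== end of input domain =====

-- B builds the 12×24 grid row by row with slice-and-pad instead of A's per-cell bounds-checked double loop (objective: simpler).


-- ===== PORT A =====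
def fill_schedule_py (sched : List (List Int)) (default : Int) : List (List Int) :=
  (List.range 12).foldl (fun out m =>
    out ++ [ (List.range 24).foldl (fun row h =>
      row ++ [ if m < sched.length ∧ h < (sched.getD m []).length
               then (sched.getD m []).getD h default else default ]) [] ]) []

-- ===== PORT B =====
def fill_schedule_py_alt (sched : List (List Int)) (default : Int) : List (List Int) :=
  (List.range 12).map (fun m =>
    if m < sched.length
    then (((sched.getD m []).take 24) ++ List.replicate 24 default).take 24
    else List.replicate 24 default)

-- ===== PRECONDITION & SPEC =====
def Spec_fill_schedule_py (sched : List (List Int)) (default : Int) (out : List (List Int)) : Prop := out = fill_schedule_py_alt sched default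
instance (sched : List (List Int)) (default : Int) (out : List (List Int)) : Decidable (Spec_fill_schedule_py sched default out) := by unfold Spec_fill_schedule_py; infer_instance

-- ===== CLAIM (what is proved, stated in full; the proofs are below) =====
def Claim_equal_fill_schedule_py : Prop := ∀ (sched : List (List Int)) (default : Int), Dom_fill_schedule_py sched default → Spec_fill_schedule_py sched default (fill_schedule_py sched default)

-- ===== LEMMAS AND PROOFS =====
theorem pv_foldl_append_map {α β : Type} (f : α → β) (l : List α) (init : List β) :
    l.foldl (fun acc x => acc ++ [f x]) init = init ++ l.map f := by
  induction l generalizing init with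
  | nil => simp
  | cons a t ih => simp [List.foldl, ih]

theorem pv_row_eq (xs : List Int) (d : Int) :
    ((xs.take 24) ++ List.replicate 24 d).take 24 =
    (List.range 24).map (fun h => if h < xs.length then xs.getD h d else d) := by
  apply List.ext_getElem
  · simp
  · intro i h1 h2
    simp only [List.getElem_take, List.getElem_map, List.getElem_range]
    simp only [List.length_take, List.length_append, List.length_replicate] at h1
    by_cases hx : i < xs.length
    · rw [List.getElem_append_left (by simp; omega)]
      simp [List.getElem_take, List.getD_eq_getElem?_getD, hx]
    · rw [List.getElem_append_right (by simp; omega), List.getElem_replicate]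
      simp [hx]

-- ===== VERDICT (by name: the statement is the Claim_ definition above) =====
theorem fill_schedule_py_spec : Claim_equal_fill_schedule_py := by
  intro sched d _
  unfold Spec_fill_schedule_py fill_schedule_py fill_schedule_py_alt
  rw [pv_foldl_append_map]
  simp only [List.nil_append]
  apply List.map_congr_left
  intro m _
  rw [pv_foldl_append_map]
  simp only [List.nil_append]
  by_cases hm : m < sched.length
  · rw [if_pos hm, pv_row_eq]
    apply List.map_congr_left
    intro h _
    simp [hm]
  · rw [if_neg hm]
    apply List.ext_getElem (by simp)
    intro i h1 h2
    simp [hm]
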